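-- pv_equiv track=rewrite | github.com/Yoo-sumi/- | 해시/위장.py | solution
-- ===== SOURCE A (Python) =====
-- def solution(clothes):
--     answer = 0
--     dic={}
--     for i in clothes:
--         dic[i[1]]=dic.get(i[1],0)+1
--     s=1
--     for i in dic.keys():
--         s*=(dic[i]+1)
--     answer=s-1
--     return answer
-- ===== SOURCE B (Python) =====
-- def solution(clothes):
--     total = 1
--     run = 0
--     prev = None
--     for k in sorted(c[1] for c in clothes):
--         if k == prev:
--             run += 1
--         else:
--             total *= run + 1
--             prev, run = k, 1
--     return total * (run + 1) - 1
-- ===== Notes on version B (the rewrite author's own statement) =====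
-- stated objective: alternative
-- what changed: Replaces A's dict-based category counting (hash counter, then a product over dict keys) with a sort-then-scan: sort the category names and fold over them once, multiplying the accumulator by (run length + 1) at each run boundary, with no intermediate count dict.
import Mathlib
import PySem

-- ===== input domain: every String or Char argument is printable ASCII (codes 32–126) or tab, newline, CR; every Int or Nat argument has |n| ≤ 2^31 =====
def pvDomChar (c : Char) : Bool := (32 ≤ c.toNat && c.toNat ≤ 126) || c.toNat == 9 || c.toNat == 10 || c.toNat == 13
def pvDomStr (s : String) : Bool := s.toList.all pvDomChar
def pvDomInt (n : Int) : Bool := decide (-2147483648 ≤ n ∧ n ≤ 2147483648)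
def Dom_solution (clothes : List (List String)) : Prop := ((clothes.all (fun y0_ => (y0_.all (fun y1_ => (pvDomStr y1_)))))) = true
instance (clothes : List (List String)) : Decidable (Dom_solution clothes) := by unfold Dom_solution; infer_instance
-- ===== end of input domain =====

-- B replaces A's hash-counting dict with a sort-then-scan pass: it sorts the category
-- names and multiplies an accumulator by (run length + 1) at each run boundary
-- (objective: alternative decomposition, same result).

-- c[1] (both Pythons index the category); Pre_ guarantees the index is in range
def pvKey (c : List String) : String := (PySem.List.pyGet? c 1).getD ""

-- ===== PORT A =====
def solution (clothes : List (List String)) : Int :=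
  let dic := clothes.foldl
    (fun (d : PySem.Dict String Int) i => d.insert (pvKey i) (d.getD (pvKey i) 0 + 1))
    PySem.Dict.empty
  let s := dic.keys.foldl (fun s k => s * (dic.getD k 0 + 1)) 1
  s - 1

-- ===== PORT B =====
-- state = (total, prev, run); prev = none before the first element (Python's None)
def pvStep (s : Int × Option String × Int) (k : String) : Int × Option String × Int :=
  if some k = s.2.1 then (s.1, s.2.1, s.2.2 + 1)
  else (s.1 * (s.2.2 + 1), some k, 1)

def solution_alt (clothes : List (List String)) : Int :=
  let st := (PySem.List.sorted (clothes.map pvKey) (fun k => k) false).foldl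
    pvStep ((1 : Int), (none : Option String), (0 : Int))
  st.1 * (st.2.2 + 1) - 1

-- ===== PRECONDITION & SPEC =====
-- Pre_ excludes inner lists with fewer than 2 entries, on which both Pythons raise IndexError at c[1]/i[1]
def Pre_solution (clothes : List (List String)) : Prop := ∀ c ∈ clothes, 2 ≤ c.length
instance (clothes : List (List String)) : Decidable (Pre_solution clothes) := by unfold Pre_solution; infer_instance

def pvWitness_solution : List (List String) :=
  [["yellow_hat", "headgear"], ["blue_sunglasses", "eyewear"], ["green_turban", "headgear"]]

def Spec_solution (clothes : List (List String)) (out : Int) : Prop := out = solution_alt clothes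
instance (clothes : List (List String)) (out : Int) : Decidable (Spec_solution clothes out) := by unfold Spec_solution; infer_instance

-- ===== CLAIM (what is proved, stated in full; the proofs are below) =====
def Claim_equal_solution : Prop := ∀ (clothes : List (List String)), Dom_solution clothes → Pre_solution clothes → Spec_solution clothes (solution clothes)

-- ===== LEMMAS AND PROOFS =====

-- the common value both programs compute (before the final -1):
-- the product over the distinct categories of (count + 1)
def pvQ (l : List String) : Int :=
  ((PySem.List.dedup l).map (fun k => (l.count k : Int) + 1)).prod

theorem pv_foldl_add_cons (xs : List String) (s : List String) (x : String) :
    xs.foldl PySem.Set.add (x :: s) =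
      x :: (xs.filter (fun y => y ≠ x)).foldl PySem.Set.add s := by
  induction xs generalizing s with
  | nil => simp
  | cons y ys ih =>
    by_cases hyx : y = x
    · subst hyx
      simp [PySem.Set.add, PySem.Set.contains, ih]
    · by_cases hmem : y ∈ s
      · simp [PySem.Set.add, PySem.Set.contains, hyx, hmem, ih]
      · simp [PySem.Set.add, PySem.Set.contains, hyx, hmem, ih]

theorem pv_dedup_cons (x : String) (xs : List String) :
    PySem.List.dedup (x :: xs) = x :: PySem.List.dedup (xs.filter (fun y => y ≠ x)) := by
  have h := pv_foldl_add_cons xs [] x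
  simp only [PySem.List.dedup_eq_ofList, PySem.Set.ofList_eq_foldl, List.foldl_cons]
  simpa [PySem.Set.add, PySem.Set.contains] using h

theorem pvQ_cons (x : String) (xs : List String) :
    pvQ (x :: xs) = ((x :: xs).count x + 1) * pvQ (xs.filter (fun y => y ≠ x)) := by
  unfold pvQ
  rw [pv_dedup_cons, List.map_cons, List.prod_cons]
  congr 1
  refine congrArg List.prod (List.map_congr_left ?_)
  intro k hk
  have hkx : k ≠ x := by
    have := (PySem.List.mem_dedup _ _).mp hk
    simp only [List.mem_filter, ne_eq, decide_eq_true_eq] at this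
    exact this.2
  rw [List.count_filter (by simp [hkx])]
  simp [Ne.symm hkx]

theorem pvQ_perm {l l' : List String} (h : l.Perm l') : pvQ l = pvQ l' := by
  unfold pvQ
  have hd : (PySem.List.dedup l).Perm (PySem.List.dedup l') :=
    (List.perm_ext_iff_of_nodup (PySem.List.nodup_dedup l) (PySem.List.nodup_dedup l')).mpr
      (fun a => by simp only [PySem.List.mem_dedup]; exact h.mem_iff)
  calc ((PySem.List.dedup l).map (fun k => (l.count k : Int) + 1)).prod
      = ((PySem.List.dedup l).map (fun k => (l'.count k : Int) + 1)).prod := by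
        refine congrArg List.prod (List.map_congr_left ?_)
        intro k _; rw [List.Perm.count h k]
    _ = _ := (hd.map _).prod_eq

-- loop invariant of B's run-counting fold, on a sorted suffix all above the previous key
theorem pv_run_inv (l : List String) (t r : Int) (k : String)
    (hs : l.Pairwise (· ≤ ·)) (hk : ∀ x ∈ l, k ≤ x) :
    (l.foldl pvStep (t, some k, r)).1 * ((l.foldl pvStep (t, some k, r)).2.2 + 1) =
      t * (r + l.count k + 1) * pvQ (l.filter (fun y => y ≠ k)) := by
  induction l generalizing t r k with
  | nil => simp [pvQ]
  | cons x l ih =>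
    rw [List.pairwise_cons] at hs
    by_cases hxk : x = k
    · subst hxk
      have h1 : pvStep (t, some x, r) x = (t, some x, r + 1) := by simp [pvStep]
      rw [List.foldl_cons, h1, ih t (r+1) x hs.2 hs.1]
      simp only [List.count_cons_self, List.filter_cons, ne_eq, not_true_eq_false,
        decide_false]
      push_cast
      ring
    · have hkx : k < x := lt_of_le_of_ne (hk x (List.mem_cons_self)) (Ne.symm hxk)
      have h1 : pvStep (t, some k, r) x = (t * (r + 1), some x, 1) := by
        simp [pvStep, hxk]
      have hall : ∀ y ∈ x :: l, k < y := by
        intro y hy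
        rcases List.mem_cons.mp hy with rfl | hy
        · exact hkx
        · exact lt_of_lt_of_le hkx (hs.1 y hy)
      rw [List.foldl_cons, h1, ih (t * (r+1)) 1 x hs.2 hs.1]
      have hc : (x :: l).count k = 0 :=
        List.count_eq_zero.mpr (fun hmem => lt_irrefl k (hall k hmem))
      have hf : (x :: l).filter (fun y => y ≠ k) = x :: l :=
        List.filter_eq_self.mpr (fun y hy => by simp [ne_of_gt (hall y hy)])
      rw [hc, hf, pvQ_cons, List.count_cons_self]
      push_cast
      ring

theorem pv_foldl_mul (l : List String) (g : String → Int) (a : Int) :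
    l.foldl (fun s k => s * g k) a = a * (l.map g).prod := by
  induction l generalizing a with
  | nil => simp
  | cons x xs ih => simp [ih, mul_assoc]

theorem pv_A_eq (clothes : List (List String)) :
    solution clothes = pvQ (clothes.map pvKey) - 1 := by
  unfold solution
  have hdic : clothes.foldl
      (fun (d : PySem.Dict String Int) i => d.insert (pvKey i) (d.getD (pvKey i) 0 + 1))
      PySem.Dict.empty = PySem.Dict.counter (clothes.map pvKey) := by
    rw [← PySem.Dict.foldl_insert_getD_add_one_eq_counter, List.foldl_map]
  rw [hdic]
  simp only [PySem.Dict.keys_counter, PySem.Dict.getD_counter]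
  rw [show (PySem.Set.ofList (clothes.map pvKey)).foldl
        (fun s k => s * (((clothes.map pvKey).count k : Int) + 1)) 1
      = pvQ (clothes.map pvKey) from by
    rw [pv_foldl_mul, one_mul, pvQ, PySem.List.dedup_eq_ofList]]

theorem pv_B_eq (clothes : List (List String)) :
    solution_alt clothes = pvQ (PySem.List.sorted (clothes.map pvKey) (fun k => k) false) - 1 := by
  show ((PySem.List.sorted (clothes.map pvKey) (fun k => k) false).foldl
      pvStep ((1 : Int), (none : Option String), (0 : Int))).1 *
      (((PySem.List.sorted (clothes.map pvKey) (fun k => k) false).foldl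
      pvStep ((1 : Int), (none : Option String), (0 : Int))).2.2 + 1) - 1 = _
  rcases hcase : PySem.List.sorted (clothes.map pvKey) (fun k => k) false with _ | ⟨x, xs⟩
  · simp [pvQ]
  · have hp : (x :: xs).Pairwise (· ≤ ·) := by
      have h := PySem.List.sorted_pairwise (clothes.map pvKey) (fun k => k)
      rw [hcase] at h
      simpa using h
    rw [List.pairwise_cons] at hp
    have h1 : pvStep (1, none, 0) x = (1, some x, 1) := by simp [pvStep]
    rw [List.foldl_cons, h1, pv_run_inv xs 1 1 x hp.2 hp.1, pvQ_cons, List.count_cons_self]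
    push_cast
    ring

-- ===== VERDICT (by name: the statement is the Claim_ definition above) =====
theorem solution_spec : Claim_equal_solution := by
  intro clothes _ _
  unfold Spec_solution
  rw [pv_A_eq, pv_B_eq, pvQ_perm (PySem.List.sorted_perm (clothes.map pvKey) (fun k => k) false)]
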